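-- pv_equiv track=rewrite | github.com/OZestina/TheGreatestGrace | codingTest/programmers/py/220917_최고집합.py | solution
-- ===== SOURCE A (Python) =====
-- def solution(n, s):
--     answer = []
--     t = n
--     for _ in range(t):
--         new = s // n
--         if new == 0:
--             return [-1]
--         answer.append(new)
--         s -= new
--         n -= 1
--     return answer
-- ===== SOURCE B (Python) =====
-- def solution(n, s):
--     # Closed form: n even parts of s, ascending; [-1] if any part would be 0.
--     if n <= 0:
--         return []
--     q = s // n
--     r = s % n
--     if q == 0 or (q == -1 and r != 0):
--         return [-1]
--     return [q] * (n - r) + [q + 1] * r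
-- ===== Notes on version B (the rewrite author's own statement) =====
-- stated objective: simpler
-- what changed: Replaces the n-step greedy subtraction loop with a closed form: q,r = s//n, s%n, answer is [q]*(n-r)+[q+1]*r, with [-1] when some part would be zero (q==0, or q==-1 with nonzero remainder).
import Mathlib
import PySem

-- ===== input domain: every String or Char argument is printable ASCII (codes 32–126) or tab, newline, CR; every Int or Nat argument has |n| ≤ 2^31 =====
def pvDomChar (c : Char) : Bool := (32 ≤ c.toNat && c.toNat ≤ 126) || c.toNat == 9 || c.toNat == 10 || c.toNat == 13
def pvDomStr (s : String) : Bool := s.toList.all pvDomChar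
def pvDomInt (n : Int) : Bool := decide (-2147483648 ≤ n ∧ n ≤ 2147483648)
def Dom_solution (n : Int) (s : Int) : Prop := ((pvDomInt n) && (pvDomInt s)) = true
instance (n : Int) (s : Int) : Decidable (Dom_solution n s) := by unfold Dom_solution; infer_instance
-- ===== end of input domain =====

-- B computes A's answer in closed form from one divmod instead of A's n-step greedy loop (objective: simpler).

-- ===== PORT A =====
-- the for-loop over range(t) with state (n, s, answer); mid-loop 'return [-1]' short-circuits
def solutionLoop : Nat → Int → Int → List Int → List Int
  | 0, _, _, answer => answer
  | Nat.succ k, n, s, answer =>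
    let new := PySem.Int.floordiv s n
    if new = 0 then [-1]
    else solutionLoop k (n - 1) (s - new) (answer ++ [new])

def solution (n : Int) (s : Int) : List Int :=
  solutionLoop n.toNat n s []

-- ===== PORT B =====
def solution_alt (n : Int) (s : Int) : List Int :=
  if n ≤ 0 then []
  else
    let q := PySem.Int.floordiv s n
    let r := PySem.Int.mod s n
    if q = 0 ∨ (q = -1 ∧ r ≠ 0) then [-1]
    else List.replicate (n - r).toNat q ++ List.replicate r.toNat (q + 1)

-- ===== PRECONDITION & SPEC =====
def Spec_solution (n : Int) (s : Int) (out : List Int) : Prop := out = solution_alt n s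
instance (n : Int) (s : Int) (out : List Int) : Decidable (Spec_solution n s out) := by unfold Spec_solution; infer_instance

-- ===== CLAIM (what is proved, stated in full; the proofs are below) =====
def Claim_equal_solution : Prop := ∀ (n : Int) (s : Int), Dom_solution n s → Spec_solution n s (solution n s)

-- ===== LEMMAS AND PROOFS =====

-- Main invariant: for 1 ≤ n = m, A's loop produces B's closed form (or [-1]).
theorem loop_ediv (m : Nat) : ∀ (n s : Int) (acc : List Int), n = (m : Int) → 1 ≤ n →
    solutionLoop m n s acc =
      (if s / n = 0 ∨ (s / n = -1 ∧ s % n ≠ 0) then [-1]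
       else acc ++ (List.replicate (n - s % n).toNat (s / n) ++ List.replicate (s % n).toNat (s / n + 1))) := by
  induction m with
  | zero => intro n s acc h h1; omega
  | succ k ih =>
    intro n s acc h h1
    have hn : 0 < n := h1
    simp only [solutionLoop, PySem.Int.floordiv_eq_ediv_of_pos hn]
    by_cases hq0 : s / n = 0
    · simp [hq0]
    · rw [if_neg hq0]
      rcases Nat.eq_zero_or_pos k with hk | hk
      · subst hk
        have hn1 : n = 1 := by omega
        subst hn1
        simp only [Int.ediv_one] at hq0
        simp [solutionLoop, Int.emod_one, Int.ediv_one, hq0]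
      · have h2 : (2 : Int) ≤ n := by omega
        have hr0 : 0 ≤ s % n := Int.emod_nonneg s (by omega)
        have hrn : s % n < n := Int.emod_lt_of_pos s hn
        rw [ih (n - 1) (s - s / n) (acc ++ [s / n]) (by omega) (by omega)]
        have key : s - s / n = s % n + (s / n) * (n - 1) := by
          linear_combination -Int.mul_ediv_add_emod s n
        by_cases hre : s % n = n - 1
        · have hq' : (s - s / n) / (n - 1) = s / n + 1 := by
            rw [key, hre, Int.add_mul_ediv_right _ _ (show (n : Int) - 1 ≠ 0 by omega),
              Int.ediv_self (show (n : Int) - 1 ≠ 0 by omega)]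
            omega
          have hr' : (s - s / n) % (n - 1) = 0 := by
            rw [key, hre, Int.add_mul_emod_self_right _ _ _, Int.emod_self]
          rw [hq', hr']
          by_cases hneg : s / n = -1
          · have hr1 : s % n ≠ 0 := by omega
            simp [hneg, hr1]
          · have hc1 : ¬(s / n + 1 = 0 ∨ (s / n + 1 = -1 ∧ (0 : Int) ≠ 0)) := by omega
            have hc2 : ¬(s / n = 0 ∨ (s / n = -1 ∧ s % n ≠ 0)) := by omega
            rw [if_neg hc1, if_neg hc2, hre]
            have e1 : ((n : Int) - (n - 1)).toNat = 1 := by omega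
            have e2 : ((n : Int) - 1 - 0).toNat = ((n : Int) - 1).toNat := by omega
            simp [e1, e2, List.append_assoc]
        · have hrlt : s % n < n - 1 := by omega
          have hq' : (s - s / n) / (n - 1) = s / n := by
            rw [key, Int.add_mul_ediv_right _ _ (show (n : Int) - 1 ≠ 0 by omega),
              Int.ediv_eq_zero_of_lt hr0 hrlt]
            omega
          have hr' : (s - s / n) % (n - 1) = s % n := by
            rw [key, Int.add_mul_emod_self_right _ _ _, Int.emod_eq_of_lt hr0 hrlt]
          rw [hq', hr']
          by_cases hc : s / n = 0 ∨ (s / n = -1 ∧ s % n ≠ 0)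
          · rw [if_pos hc, if_pos hc]
          · rw [if_neg hc, if_neg hc]
            have e1 : ((n : Int) - s % n).toNat = ((n : Int) - 1 - s % n).toNat + 1 := by omega
            rw [e1, List.replicate_succ]
            simp [List.append_assoc]

-- ===== VERDICT (by name: the statement is the Claim_ definition above) =====
theorem solution_spec : Claim_equal_solution := by
  intro n s _
  unfold Spec_solution solution solution_alt
  by_cases hn : n ≤ 0
  · have h0 : n.toNat = 0 := by omega
    simp [h0, solutionLoop, hn]
  · have h1 : (1 : Int) ≤ n := by omega
    rw [loop_ediv n.toNat n s [] (by omega) h1]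
    rw [if_neg hn, PySem.Int.floordiv_eq_ediv_of_pos (by omega : (0:Int) < n),
      PySem.Int.mod_eq_emod_of_pos (by omega : (0:Int) < n)]
    rfl
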